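-- pv_equiv track=rewrite | github.com/fraimerdev/securo | app.py | classify_crime
-- ===== SOURCE A (Python) =====
-- def classify_crime(title):
--     """Classify crime type and severity based on title"""
--     title_lower = title.lower()
--
--     # High severity crimes
--     if any(word in title_lower for word in ['murder', 'homicide', 'killed', 'death', 'shooting', 'stabbing']):
--         return {'category': 'violent', 'name': 'Homicide/Violent Crime'}, 'critical'
--
--     # Violent crimes
--     if any(word in title_lower for word in ['assault', 'robbery', 'attack', 'violence', 'rape', 'kidnap']):
--         return {'category': 'violent', 'name': 'Violent Crime'}, 'high'
--
--     # Property crimes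
--     if any(word in title_lower for word in ['burglary', 'theft', 'stolen', 'breaking', 'vandalism']):
--         return {'category': 'property', 'name': 'Property Crime'}, 'medium'
--
--     # Drug crimes
--     if any(word in title_lower for word in ['drugs', 'trafficking', 'possession', 'narcotics']):
--         return {'category': 'drug', 'name': 'Drug Offense'}, 'high'
--
--     # Fraud
--     if any(word in title_lower for word in ['fraud', 'scam', 'financial', 'money laundering']):
--         return {'category': 'fraud', 'name': 'Financial Crime'}, 'medium'
--
--     # Traffic
--     if any(word in title_lower for word in ['traffic', 'accident', 'collision', 'hit and run', 'driving']):
--         return {'category': 'traffic', 'name': 'Traffic Incident'}, 'low'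
--
--     # Default
--     return {'category': 'other', 'name': 'General Incident'}, 'medium'
-- ===== SOURCE B (Python) =====
-- # Min-priority scan over one flat keyword map: instead of testing rule groups in
-- # order, every keyword is looked up independently and the lowest-priority match wins.
-- KEYWORDS = {
--     'murder':   (0, 'violent', 'Homicide/Violent Crime', 'critical'),
--     'homicide': (0, 'violent', 'Homicide/Violent Crime', 'critical'),
--     'killed':   (0, 'violent', 'Homicide/Violent Crime', 'critical'),
--     'death':    (0, 'violent', 'Homicide/Violent Crime', 'critical'),
--     'shooting': (0, 'violent', 'Homicide/Violent Crime', 'critical'),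
--     'stabbing': (0, 'violent', 'Homicide/Violent Crime', 'critical'),
--     'assault':  (1, 'violent', 'Violent Crime', 'high'),
--     'robbery':  (1, 'violent', 'Violent Crime', 'high'),
--     'attack':   (1, 'violent', 'Violent Crime', 'high'),
--     'violence': (1, 'violent', 'Violent Crime', 'high'),
--     'rape':     (1, 'violent', 'Violent Crime', 'high'),
--     'kidnap':   (1, 'violent', 'Violent Crime', 'high'),
--     'burglary': (2, 'property', 'Property Crime', 'medium'),
--     'theft':    (2, 'property', 'Property Crime', 'medium'),
--     'stolen':   (2, 'property', 'Property Crime', 'medium'),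
--     'breaking': (2, 'property', 'Property Crime', 'medium'),
--     'vandalism': (2, 'property', 'Property Crime', 'medium'),
--     'drugs':    (3, 'drug', 'Drug Offense', 'high'),
--     'trafficking': (3, 'drug', 'Drug Offense', 'high'),
--     'possession': (3, 'drug', 'Drug Offense', 'high'),
--     'narcotics': (3, 'drug', 'Drug Offense', 'high'),
--     'fraud':    (4, 'fraud', 'Financial Crime', 'medium'),
--     'scam':     (4, 'fraud', 'Financial Crime', 'medium'),
--     'financial': (4, 'fraud', 'Financial Crime', 'medium'),
--     'money laundering': (4, 'fraud', 'Financial Crime', 'medium'),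
--     'traffic':  (5, 'traffic', 'Traffic Incident', 'low'),
--     'accident': (5, 'traffic', 'Traffic Incident', 'low'),
--     'collision': (5, 'traffic', 'Traffic Incident', 'low'),
--     'hit and run': (5, 'traffic', 'Traffic Incident', 'low'),
--     'driving':  (5, 'traffic', 'Traffic Incident', 'low'),
-- }
--
-- def classify_crime(title):
--     """Classify crime type and severity: keep the minimum-priority matching keyword."""
--     title_lower = title.lower()
--     best = None
--     for keyword, entry in KEYWORDS.items():
--         if keyword in title_lower and (best is None or entry[0] < best[0]):
--             best = entry
--     if best is None:
--         return {'category': 'other', 'name': 'General Incident'}, 'medium'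
--     _, category, name, severity = best
--     return {'category': category, 'name': name}, severity
-- ===== Notes on version B (the rewrite author's own statement) =====
-- stated objective: alternative
-- what changed: Replaces the ordered six-branch first-match chain by one flat keyword->(priority,category,name,severity) map scanned once with a minimum-priority accumulator; the lowest-priority matching keyword determines the result.
import Mathlib
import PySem

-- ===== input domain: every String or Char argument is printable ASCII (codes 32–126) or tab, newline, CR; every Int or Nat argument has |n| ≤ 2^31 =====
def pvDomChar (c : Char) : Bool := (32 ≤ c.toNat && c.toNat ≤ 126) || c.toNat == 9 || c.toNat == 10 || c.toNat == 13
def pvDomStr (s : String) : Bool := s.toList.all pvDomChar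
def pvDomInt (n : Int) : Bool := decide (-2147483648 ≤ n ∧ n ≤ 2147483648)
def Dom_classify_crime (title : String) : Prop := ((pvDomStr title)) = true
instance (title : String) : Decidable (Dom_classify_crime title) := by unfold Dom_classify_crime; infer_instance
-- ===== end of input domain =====

-- B replaces A's ordered first-match branch chain by one flat keyword map scanned once
-- with a minimum-priority accumulator (alternative decomposition; same cost).
-- ===== PORT A =====
def classify_crime (title : String) : (List (String × String)) × String :=
  if ["murder", "homicide", "killed", "death", "shooting", "stabbing"].any
      (fun word => PySem.Str.isIn word (PySem.Str.lower title)) then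
    ([("category", "violent"), ("name", "Homicide/Violent Crime")], "critical")
  else if ["assault", "robbery", "attack", "violence", "rape", "kidnap"].any
      (fun word => PySem.Str.isIn word (PySem.Str.lower title)) then
    ([("category", "violent"), ("name", "Violent Crime")], "high")
  else if ["burglary", "theft", "stolen", "breaking", "vandalism"].any
      (fun word => PySem.Str.isIn word (PySem.Str.lower title)) then
    ([("category", "property"), ("name", "Property Crime")], "medium")
  else if ["drugs", "trafficking", "possession", "narcotics"].any
      (fun word => PySem.Str.isIn word (PySem.Str.lower title)) then
    ([("category", "drug"), ("name", "Drug Offense")], "high")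
  else if ["fraud", "scam", "financial", "money laundering"].any
      (fun word => PySem.Str.isIn word (PySem.Str.lower title)) then
    ([("category", "fraud"), ("name", "Financial Crime")], "medium")
  else if ["traffic", "accident", "collision", "hit and run", "driving"].any
      (fun word => PySem.Str.isIn word (PySem.Str.lower title)) then
    ([("category", "traffic"), ("name", "Traffic Incident")], "low")
  else
    ([("category", "other"), ("name", "General Incident")], "medium")

-- ===== PORT B =====
-- The flat KEYWORDS dict from Source B: keyword -> (priority, category, name, severity).
def crimeKeywords : List (String × Int × String × String × String) :=
  [ ("murder",   (0, "violent", "Homicide/Violent Crime", "critical")),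
    ("homicide", (0, "violent", "Homicide/Violent Crime", "critical")),
    ("killed",   (0, "violent", "Homicide/Violent Crime", "critical")),
    ("death",    (0, "violent", "Homicide/Violent Crime", "critical")),
    ("shooting", (0, "violent", "Homicide/Violent Crime", "critical")),
    ("stabbing", (0, "violent", "Homicide/Violent Crime", "critical")),
    ("assault",  (1, "violent", "Violent Crime", "high")),
    ("robbery",  (1, "violent", "Violent Crime", "high")),
    ("attack",   (1, "violent", "Violent Crime", "high")),
    ("violence", (1, "violent", "Violent Crime", "high")),
    ("rape",     (1, "violent", "Violent Crime", "high")),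
    ("kidnap",   (1, "violent", "Violent Crime", "high")),
    ("burglary", (2, "property", "Property Crime", "medium")),
    ("theft",    (2, "property", "Property Crime", "medium")),
    ("stolen",   (2, "property", "Property Crime", "medium")),
    ("breaking", (2, "property", "Property Crime", "medium")),
    ("vandalism", (2, "property", "Property Crime", "medium")),
    ("drugs",    (3, "drug", "Drug Offense", "high")),
    ("trafficking", (3, "drug", "Drug Offense", "high")),
    ("possession", (3, "drug", "Drug Offense", "high")),
    ("narcotics", (3, "drug", "Drug Offense", "high")),
    ("fraud",    (4, "fraud", "Financial Crime", "medium")),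
    ("scam",     (4, "fraud", "Financial Crime", "medium")),
    ("financial", (4, "fraud", "Financial Crime", "medium")),
    ("money laundering", (4, "fraud", "Financial Crime", "medium")),
    ("traffic",  (5, "traffic", "Traffic Incident", "low")),
    ("accident", (5, "traffic", "Traffic Incident", "low")),
    ("collision", (5, "traffic", "Traffic Incident", "low")),
    ("hit and run", (5, "traffic", "Traffic Incident", "low")),
    ("driving",  (5, "traffic", "Traffic Incident", "low")) ]

-- Source B's for-loop: keep the matching entry with the smallest priority.
def bestScan (title_lower : String) :
    List (String × Int × String × String × String) →
    Option (Int × String × String × String) → Option (Int × String × String × String)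
  | [], best => best
  | (keyword, entry) :: rest, best =>
      bestScan title_lower rest
        (if PySem.Str.isIn keyword title_lower &&
            (match best with | none => true | some b => decide (entry.1 < b.1)) then
           some entry
         else best)

def classify_crime_alt (title : String) : (List (String × String)) × String :=
  match bestScan (PySem.Str.lower title) crimeKeywords none with
  | none => ([("category", "other"), ("name", "General Incident")], "medium")
  | some (_, category, name, severity) =>
      ([("category", category), ("name", name)], severity)

-- ===== PRECONDITION & SPEC =====
def Spec_classify_crime (title : String) (out : (List (String × String)) × String) : Prop := out = classify_crime_alt title
instance (title : String) (out : (List (String × String)) × String) : Decidable (Spec_classify_crime title out) := by unfold Spec_classify_crime; infer_instance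

-- ===== CLAIM (what is proved, stated in full; the proofs are below) =====
def Claim_equal_classify_crime : Prop := ∀ (title : String), Dom_classify_crime title → Spec_classify_crime title (classify_crime title)

-- ===== LEMMAS AND PROOFS =====

-- once the accumulator holds an entry whose priority is not beaten by anything left, it stays.
theorem bestScan_stay (tl : String) (L : List (String × Int × String × String × String))
    (a : Int × String × String × String) (h : ∀ e ∈ L, ¬ (e.2.1 < a.1)) :
    bestScan tl L (some a) = some a := by
  induction L with
  | nil => rfl
  | cons x rest ih =>
      obtain ⟨kw, e⟩ := x
      have he : decide (e.1 < a.1) = false := by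
        simp only [decide_eq_false_iff_not]
        exact h (kw, e) (List.mem_cons_self ..)
      simp only [bestScan, he, Bool.and_false]
      exact ih (fun e' he' => h e' (List.mem_cons_of_mem _ he'))

-- a block of keywords all mapping to entry v, followed by entries of no smaller priority:
-- the scan returns v iff some keyword of the block matches, else it continues on the rest.
theorem bestScan_group (tl : String) (ws : List String) (v : Int × String × String × String)
    (rest : List (String × Int × String × String × String))
    (hrest : ∀ e ∈ rest, ¬ (e.2.1 < v.1)) :
    bestScan tl (ws.map (fun w => (w, v)) ++ rest) none =
      (if ws.any (fun w => PySem.Str.isIn w tl) then some v else bestScan tl rest none) := by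
  induction ws with
  | nil => simp
  | cons w ws ih =>
      by_cases h : PySem.Str.isIn w tl = true
      · simp only [List.map, List.cons_append, bestScan, h, Bool.true_and, if_true,
          List.any_cons, Bool.true_or]
        exact bestScan_stay tl _ v (by
          intro e he
          rcases List.mem_append.mp he with hm | hr
          · obtain ⟨w', _, rfl⟩ := List.mem_map.mp hm
            simp
          · exact hrest e hr)
      · simp only [Bool.not_eq_true] at h
        simp only [List.map, List.cons_append, bestScan, h, Bool.false_and,
          List.any_cons, Bool.false_or]
        exact ih

-- the flat table is the concatenation of the six constant-entry blocks.
theorem crimeKeywords_eq :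
    crimeKeywords =
      (["murder", "homicide", "killed", "death", "shooting", "stabbing"].map
        (fun w => (w, ((0 : Int), "violent", "Homicide/Violent Crime", "critical")))) ++
      ((["assault", "robbery", "attack", "violence", "rape", "kidnap"].map
        (fun w => (w, ((1 : Int), "violent", "Violent Crime", "high")))) ++
      ((["burglary", "theft", "stolen", "breaking", "vandalism"].map
        (fun w => (w, ((2 : Int), "property", "Property Crime", "medium")))) ++
      ((["drugs", "trafficking", "possession", "narcotics"].map
        (fun w => (w, ((3 : Int), "drug", "Drug Offense", "high")))) ++
      ((["fraud", "scam", "financial", "money laundering"].map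
        (fun w => (w, ((4 : Int), "fraud", "Financial Crime", "medium")))) ++
      ((["traffic", "accident", "collision", "hit and run", "driving"].map
        (fun w => (w, ((5 : Int), "traffic", "Traffic Incident", "low")))) ++ []))))) := by
  rfl

-- ===== VERDICT (by name: the statement is the Claim_ definition above) =====
theorem classify_crime_spec : Claim_equal_classify_crime := by
  intro title _
  show classify_crime title = classify_crime_alt title
  unfold classify_crime classify_crime_alt
  rw [crimeKeywords_eq]
  rw [bestScan_group _ _ _ _ (by decide)]
  rw [bestScan_group _ _ _ _ (by decide)]
  rw [bestScan_group _ _ _ _ (by decide)]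
  rw [bestScan_group _ _ _ _ (by decide)]
  rw [bestScan_group _ _ _ _ (by decide)]
  rw [bestScan_group _ _ _ _ (by decide)]
  split_ifs <;> rfl
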